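-- pv_equiv track=rewrite | github.com/tlebryk/un-bench-eda | etl/parsing/resolution_segmentation.py | _split_preamble_paragraphs
-- ===== SOURCE A (Python) =====
-- from typing import Dict, List
--
-- PREAMBLE_STARTERS = [
--     'The General Assembly',
--     'Guided',
--     'Recalling',
--     'Welcoming',
--     'Recognizing',
--     'Noting',
--     'Reaffirming',
--     'Bearing in mind',
--     'Mindful',
--     'Acknowledging',
--     'Emphasizing',
--     'Convinced',
--     'Concerned',
--     'Aware',
--     'Deeply concerned',
--     'Gravely concerned',
--     'Alarmed',
--     'Appreciating',
--     'Deploring',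
--     'Desirous',
--     'Determined',
--     'Expressing',
--     'Having considered',
--     'Having examined',
--     'Observing',
--     'Reiterating',
--     'Stressing',
--     'Taking into account',
--     'Taking note',
--     'Underlining',
--     'Affirming',
--     'Believing',
--     'Considering',
--     'Desiring',
-- ]
--
-- def _split_preamble_paragraphs(text: str) -> List[str]:
--     """
--     Split preamble into individual paragraphs.
--
--     Preamble paragraphs typically start with gerunds or specific phrases.
--
--     Args:
--         text: Preamble text
--
--     Returns:
--         List of preamble paragraph strings
--     """
--     if not text.strip():
--         return []
--
--     paragraphs = []
--     current_para = []
--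
--     lines = text.split('\n')
--
--     for line in lines:
--         line_stripped = line.strip()
--
--         if not line_stripped:
--             continue
--
--         # Check if line starts a new paragraph
--         starts_new = False
--         for starter in PREAMBLE_STARTERS:
--             if line_stripped.startswith(starter):
--                 starts_new = True
--                 break
--
--         if starts_new and current_para:
--             # Save previous paragraph
--             para_text = ' '.join(current_para)
--             paragraphs.append(para_text)
--             current_para = [line_stripped]
--         else:
--             current_para.append(line_stripped)
--
--     # Add final paragraph
--     if current_para:
--         para_text = ' '.join(current_para)
--         paragraphs.append(para_text)
--
--     return paragraphs
-- ===== SOURCE B (Python) =====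
-- from typing import List
--
-- PREAMBLE_STARTERS = [
--     'The General Assembly',
--     'Guided',
--     'Recalling',
--     'Welcoming',
--     'Recognizing',
--     'Noting',
--     'Reaffirming',
--     'Bearing in mind',
--     'Mindful',
--     'Acknowledging',
--     'Emphasizing',
--     'Convinced',
--     'Concerned',
--     'Aware',
--     'Deeply concerned',
--     'Gravely concerned',
--     'Alarmed',
--     'Appreciating',
--     'Deploring',
--     'Desirous',
--     'Determined',
--     'Expressing',
--     'Having considered',
--     'Having examined',
--     'Observing',
--     'Reiterating',
--     'Stressing',
--     'Taking into account',
--     'Taking note',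
--     'Underlining',
--     'Affirming',
--     'Believing',
--     'Considering',
--     'Desiring',
-- ]
--
-- _STARTERS = tuple(PREAMBLE_STARTERS)
--
--
-- def _paras(lines: List[str]) -> List[str]:
--     """One paragraph = the first line plus all following non-starter lines; recurse on the rest."""
--     if not lines:
--         return []
--     i = 1
--     while i < len(lines) and not lines[i].startswith(_STARTERS):
--         i += 1
--     return [' '.join(lines[:i])] + _paras(lines[i:])
--
--
-- def _split_preamble_paragraphs(text: str) -> List[str]:
--     if not text.strip():
--         return []
--     lines = [s for s in (ln.strip() for ln in text.split('\n')) if s]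
--     return _paras(lines)
-- ===== Notes on version B (the rewrite author's own statement) =====
-- stated objective: alternative
-- what changed: A's single-pass accumulator loop (paragraphs/current_para state with a final flush) is replaced by first materialising the non-empty stripped lines and then recursively peeling off one paragraph at a time (first line plus the following non-starter lines).
import Mathlib
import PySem

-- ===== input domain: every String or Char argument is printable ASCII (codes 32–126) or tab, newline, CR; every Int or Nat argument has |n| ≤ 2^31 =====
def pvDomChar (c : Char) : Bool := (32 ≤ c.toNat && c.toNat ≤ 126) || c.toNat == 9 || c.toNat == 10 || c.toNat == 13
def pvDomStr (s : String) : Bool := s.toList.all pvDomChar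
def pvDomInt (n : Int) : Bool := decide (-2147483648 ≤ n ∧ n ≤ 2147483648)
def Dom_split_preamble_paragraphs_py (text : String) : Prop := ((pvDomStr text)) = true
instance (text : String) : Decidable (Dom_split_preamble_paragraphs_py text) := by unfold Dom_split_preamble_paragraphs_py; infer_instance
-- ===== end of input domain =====

-- B replaces A's single-pass accumulator loop by a recursive decomposition (take one
-- paragraph = first line plus following non-starter lines, recurse on the rest); objective:
-- alternative decomposition, same cost.

def pvStarters : List String :=
  ["The General Assembly", "Guided", "Recalling", "Welcoming", "Recognizing", "Noting",
   "Reaffirming", "Bearing in mind", "Mindful", "Acknowledging", "Emphasizing", "Convinced",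
   "Concerned", "Aware", "Deeply concerned", "Gravely concerned", "Alarmed", "Appreciating",
   "Deploring", "Desirous", "Determined", "Expressing", "Having considered", "Having examined",
   "Observing", "Reiterating", "Stressing", "Taking into account", "Taking note", "Underlining",
   "Affirming", "Believing", "Considering", "Desiring"]

-- text.split('\n') (shared by both ports; sep is the non-empty literal "\n", so Python's split never raises)
def pvSplitLines (text : String) : List String :=
  (PySem.Chars.splitOn text.toList ['\n']).map String.ofList

-- ===== PORT A =====
-- one iteration of A's `for line in lines` loop; state = (paragraphs, current_para)
def pvStepA (st : List String × List String) (line : String) : List String × List String :=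
  let ls := PySem.Str.strip line
  if ls = "" then st
  else
    let startsNew := pvStarters.any (fun p => PySem.Str.startswith ls p)
    if startsNew && !st.2.isEmpty then (st.1 ++ [PySem.Str.join " " st.2], [ls])
    else (st.1, st.2 ++ [ls])

def split_preamble_paragraphs_py (text : String) : List String :=
  if PySem.Str.strip text = "" then []
  else
    let lines := pvSplitLines text
    let st := lines.foldl pvStepA ([], [])
    if !st.2.isEmpty then st.1 ++ [PySem.Str.join " " st.2] else st.1

-- ===== PORT B =====
-- lines[i].startswith(_STARTERS) with a tuple argument
def pvIsStarter (s : String) : Bool := pvStarters.any (fun p => PySem.Str.startswith s p)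

-- Source B's _paras: the while loop advances i past the non-starter tail lines, i.e. lines[1:i]
-- is the longest starter-free prefix of the tail (takeWhile) and lines[i:] is the rest (dropWhile)
def pvParas : List String → List String
  | [] => []
  | x :: xs =>
      PySem.Str.join " " (x :: xs.takeWhile (fun s => !pvIsStarter s)) ::
        pvParas (xs.dropWhile (fun s => !pvIsStarter s))
termination_by l => l.length
decreasing_by
  simpa using Nat.lt_succ_of_le (List.length_dropWhile_le _ _)

def split_preamble_paragraphs_py_alt (text : String) : List String :=
  if PySem.Str.strip text = "" then []
  else
    pvParas (((pvSplitLines text).map PySem.Str.strip).filter (fun s => !(s == "")))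

-- ===== PRECONDITION & SPEC =====
def Spec_split_preamble_paragraphs_py (text : String) (out : List String) : Prop := out = split_preamble_paragraphs_py_alt text
instance (text : String) (out : List String) : Decidable (Spec_split_preamble_paragraphs_py text out) := by unfold Spec_split_preamble_paragraphs_py; infer_instance

-- ===== CLAIM (what is proved, stated in full; the proofs are below) =====
def Claim_equal_split_preamble_paragraphs_py : Prop := ∀ (text : String), Dom_split_preamble_paragraphs_py text → Spec_split_preamble_paragraphs_py text (split_preamble_paragraphs_py text)

-- ===== LEMMAS AND PROOFS =====

-- A's loop step restricted to already-stripped, non-empty lines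
def pvStepB (st : List String × List String) (ls : String) : List String × List String :=
  if pvIsStarter ls && !st.2.isEmpty then (st.1 ++ [PySem.Str.join " " st.2], [ls])
  else (st.1, st.2 ++ [ls])

def pvFinish (st : List String × List String) : List String :=
  if !st.2.isEmpty then st.1 ++ [PySem.Str.join " " st.2] else st.1

-- folding A's step over raw lines = folding the stripped step over the non-empty stripped lines
theorem stepA_eq (st : List String × List String) (l : String) :
    pvStepA st l = if PySem.Str.strip l = "" then st else pvStepB st (PySem.Str.strip l) := rfl

theorem foldl_stepA_eq (lines : List String) : ∀ st,
    lines.foldl pvStepA st =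
      ((lines.map PySem.Str.strip).filter (fun s => !(s == ""))).foldl pvStepB st := by
  induction lines with
  | nil => intro st; rfl
  | cons l rest ih =>
      intro st
      rw [List.foldl_cons, stepA_eq, ih]
      by_cases h : PySem.Str.strip l = ""
      · simp [h]
      · simp [h]

theorem finish_foldl_stepB (L : List String) : ∀ p c, c ≠ [] →
    pvFinish (L.foldl pvStepB (p, c)) =
      p ++ (PySem.Str.join " " (c ++ L.takeWhile (fun s => !pvIsStarter s)) ::
            pvParas (L.dropWhile (fun s => !pvIsStarter s))) := by
  induction L with
  | nil =>
      intro p c hc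
      simp [pvFinish, pvParas, hc]
  | cons x xs ih =>
      intro p c hc
      by_cases hx : pvIsStarter x
      · have hstep : pvStepB (p, c) x = (p ++ [PySem.Str.join " " c], [x]) := by
          simp [pvStepB, hx, hc]
        simp only [List.foldl, hstep]
        rw [ih (p ++ [PySem.Str.join " " c]) [x] (by simp)]
        simp [List.takeWhile, List.dropWhile, hx, pvParas]
      · have hstep : pvStepB (p, c) x = (p, c ++ [x]) := by
          simp [pvStepB, hx]
        simp only [List.foldl, hstep]
        rw [ih p (c ++ [x]) (by simp)]
        simp [List.takeWhile, List.dropWhile, hx]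

-- ===== VERDICT (by name: the statement is the Claim_ definition above) =====
theorem split_preamble_paragraphs_py_spec : Claim_equal_split_preamble_paragraphs_py := by
  intro text _
  unfold Spec_split_preamble_paragraphs_py split_preamble_paragraphs_py split_preamble_paragraphs_py_alt
  by_cases h : PySem.Str.strip text = ""
  · simp [h]
  · simp only [h, if_false]
    rw [foldl_stepA_eq]
    cases hL : ((pvSplitLines text).map PySem.Str.strip).filter (fun s => !(s == "")) with
    | nil => simp [pvParas]
    | cons x xs =>
        have hstep : pvStepB ([], []) x = ([], [x]) := by simp [pvStepB]
        show pvFinish ((x :: xs).foldl pvStepB ([], [])) = pvParas (x :: xs)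
        simp only [List.foldl, hstep]
        rw [finish_foldl_stepB xs [] [x] (by simp)]
        simp [pvParas]
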